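-- pv_equiv track=rewrite | github.com/aramidefemi/Research-assistant-agent | paper_graph/nodes.py | _normalize_profile_label
-- ===== SOURCE A (Python) =====
-- def _normalize_profile_label(label: str) -> str:
--     chars: list[str] = []
--     for ch in label.upper():
--         if "A" <= ch <= "Z" or "0" <= ch <= "9":
--             chars.append(ch)
--         else:
--             chars.append("_")
--     normalized = "".join(chars).strip("_")
--     while "__" in normalized:
--         normalized = normalized.replace("__", "_")
--     return normalized
-- ===== SOURCE B (Python) =====
-- def _normalize_profile_label(label: str) -> str:
--     # One pass with a pending-separator flag: no join/strip, no repeated replace.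
--     out: list[str] = []
--     pending = False
--     for ch in label.upper():
--         if "A" <= ch <= "Z" or "0" <= ch <= "9":
--             if pending and out:
--                 out.append("_")
--             out.append(ch)
--             pending = False
--         else:
--             pending = True
--     return "".join(out)
-- ===== Notes on version B (the rewrite author's own statement) =====
-- stated objective: simpler
-- what changed: Replaces A's three phases (build a per-character list, join it, strip edge underscores, then repeatedly collapse double underscores until fixpoint) by a single left-to-right pass holding a pending-separator flag, which strips and collapses separators as it goes.
import Mathlib
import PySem

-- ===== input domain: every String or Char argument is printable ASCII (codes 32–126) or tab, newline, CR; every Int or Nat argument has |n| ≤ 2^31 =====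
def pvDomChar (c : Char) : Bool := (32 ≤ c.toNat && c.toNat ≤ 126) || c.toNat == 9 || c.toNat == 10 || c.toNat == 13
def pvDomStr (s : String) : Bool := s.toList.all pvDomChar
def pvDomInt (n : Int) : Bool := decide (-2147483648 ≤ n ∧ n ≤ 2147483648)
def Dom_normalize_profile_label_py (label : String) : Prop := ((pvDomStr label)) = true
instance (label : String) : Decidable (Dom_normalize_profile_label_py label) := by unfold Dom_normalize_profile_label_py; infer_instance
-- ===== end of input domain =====

-- B replaces A's per-character list build + strip + repeated "__"-replace loop by a single
-- left-to-right pass with a pending-separator flag (objective: simpler, one traversal).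

-- ===== PORT A =====
-- the 'while "__" in normalized' loop; fuel = the string's length is always enough,
-- since each iteration that fires shortens the string by at least one character
def pyAwhile : Nat → List Char → List Char
  | 0, s => s
  | f + 1, s =>
    if PySem.Chars.isIn ['_', '_'] s then
      pyAwhile f (PySem.Chars.replace s ['_', '_'] ['_'])
    else s

def normalize_profile_label_py (label : String) : String :=
  -- chars: list[str] built by appending ch or "_" for each ch of label.upper()
  let chars : List (List Char) :=
    (PySem.Str.upper label).toList.foldl
      (fun acc ch =>
        if ('A' ≤ ch ∧ ch ≤ 'Z') ∨ ('0' ≤ ch ∧ ch ≤ '9') then acc ++ [[ch]]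
        else acc ++ [['_']]) []
  -- normalized = "".join(chars).strip("_")
  let normalized := PySem.Chars.stripChars (PySem.Chars.join [] chars) ['_']
  String.ofList (pyAwhile normalized.length normalized)

-- ===== PORT B =====
def normalize_profile_label_py_alt (label : String) : String :=
  String.ofList
    ((PySem.Str.upper label).toList.foldl
      (fun (st : List Char × Bool) ch =>
        if ('A' ≤ ch ∧ ch ≤ 'Z') ∨ ('0' ≤ ch ∧ ch ≤ '9') then
          ((if st.2 && !st.1.isEmpty then st.1 ++ ['_'] else st.1) ++ [ch], false)
        else (st.1, true))
      ([], false)).1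

-- ===== PRECONDITION & SPEC =====
def Spec_normalize_profile_label_py (label : String) (out : String) : Prop := out = normalize_profile_label_py_alt label
instance (label : String) (out : String) : Decidable (Spec_normalize_profile_label_py label out) := by unfold Spec_normalize_profile_label_py; infer_instance

-- ===== CLAIM (what is proved, stated in full; the proofs are below) =====
def Claim_equal_normalize_profile_label_py : Prop := ∀ (label : String), Dom_normalize_profile_label_py label → Spec_normalize_profile_label_py label (normalize_profile_label_py label)

-- ===== LEMMAS AND PROOFS =====

-- underscore test used by strip("_") and by the run analysis
def us (c : Char) : Bool := decide (c = '_')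

-- what one character of label.upper() contributes
def mapc (c : Char) : Char :=
  if ('A' ≤ c ∧ c ≤ 'Z') ∨ ('0' ≤ c ∧ c ≤ '9') then c else '_'

-- one global pass of .replace("__", "_")
def myRep : List Char → List Char
  | [] => []
  | [c] => [c]
  | c :: d :: r => if c = '_' ∧ d = '_' then '_' :: myRep r else c :: myRep (d :: r)

-- collapse every maximal run of '_' to a single '_'
def collapse : List Char → List Char
  | [] => []
  | c :: r =>
    if c = '_' then '_' :: collapse (r.dropWhile us) else c :: collapse r
termination_by s => s.length
decreasing_by
  · simpa using Nat.lt_succ_of_le (List.length_dropWhile_le us r)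
  · simp

-- the tail behaviour of B's fold once the accumulator is nonempty
def tfun : Bool → List Char → List Char
  | _, [] => []
  | p, c :: r => if c = '_' then tfun true r else (if p then ['_'] else []) ++ c :: tfun false r

-- B's fold from the empty accumulator
def startf : List Char → List Char
  | [] => []
  | c :: r => if c = '_' then startf r else c :: tfun false r

lemma go_spec (fuel : Nat) : ∀ (l acc : List Char), l.length ≤ fuel →
    PySem.Chars.replace.go ['_', '_'] ['_'] fuel l acc = acc.reverse ++ myRep l := by
  induction fuel with
  | zero =>
    intro l acc h
    have : l = [] := List.eq_nil_of_length_eq_zero (Nat.le_zero.mp h)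
    subst this
    simp [PySem.Chars.replace.go, myRep]
  | succ f ih =>
    intro l acc h
    match l with
    | [] => simp [PySem.Chars.replace.go, myRep]
    | [c] =>
      have hpre : (['_', '_'] : List Char).isPrefixOf [c] = false := by
        simp [List.isPrefixOf]
      simp only [PySem.Chars.replace.go, hpre, Bool.false_eq_true, if_false]
      rw [ih [] (c :: acc) (by simp)]
      simp [myRep]
    | c :: d :: r =>
      by_cases hcd : c = '_' ∧ d = '_'
      · obtain ⟨hc, hd⟩ := hcd
        subst hc; subst hd
        have hpre : (['_', '_'] : List Char).isPrefixOf ('_' :: '_' :: r) = true := by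
          simp [List.isPrefixOf]
        simp only [PySem.Chars.replace.go, hpre, if_true]
        rw [show List.drop (['_', '_'] : List Char).length ('_' :: '_' :: r) = r by simp]
        rw [show (['_'] : List Char).reverse ++ acc = '_' :: acc by simp]
        rw [ih r (('_' : Char) :: acc) (by simp at h ⊢; omega)]
        simp [myRep]
      · have hpre : (['_', '_'] : List Char).isPrefixOf (c :: d :: r) = false := by
          rcases (not_and_or.mp hcd) with hc | hd
          · simp [List.isPrefixOf]
            intro h; exact absurd h.symm hc
          · simp [List.isPrefixOf]
            intro _ h; exact absurd h.symm hd
        simp only [PySem.Chars.replace.go, hpre, Bool.false_eq_true, if_false]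
        rw [ih (d :: r) (c :: acc) (by simp at h ⊢; omega)]
        simp [myRep, hcd]

lemma replace_eq_myRep (s : List Char) :
    PySem.Chars.replace s ['_', '_'] ['_'] = myRep s := by
  simp only [PySem.Chars.replace]
  rw [if_neg (by simp)]
  simpa using go_spec s.length s [] le_rfl

lemma length_myRep_le (s : List Char) : (myRep s).length ≤ s.length := by
  induction s using myRep.induct with
  | case1 => simp [myRep]
  | case2 c => simp [myRep]
  | case3 c d r h ih =>
    obtain ⟨hc, hd⟩ := h
    subst hc; subst hd
    rw [show myRep ('_' :: '_' :: r) = '_' :: myRep r from by simp [myRep]]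
    simp at ih ⊢; omega
  | case4 c d r h ih =>
    simp only [myRep, if_neg h]
    simp at ih ⊢; omega

lemma length_myRep_lt (s : List Char) (h : (['_', '_'] : List Char) <:+: s) :
    (myRep s).length < s.length := by
  induction s using myRep.induct with
  | case1 => simp at h
  | case2 c =>
    exfalso
    have := h.length_le
    simp at this
  | case3 c d r hg ih =>
    obtain ⟨hc, hd⟩ := hg
    subst hc; subst hd
    have := length_myRep_le r
    rw [show myRep ('_' :: '_' :: r) = '_' :: myRep r from by simp [myRep]]
    simp at this ⊢; omega
  | case4 c d r hg ih =>
    have hdr : (['_', '_'] : List Char) <:+: d :: r := by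
      rcases List.infix_cons_iff.mp h with hpre | hinf
      · exfalso
        rcases hpre with ⟨t, ht⟩
        simp at ht
        exact hg ⟨ht.1.symm, ht.2.1.symm⟩
      · exact hinf
    have := ih hdr
    simp only [myRep, if_neg hg]
    simp at this ⊢; omega

lemma myRep_head (d : Char) (r : List Char) : ∃ t, myRep (d :: r) = d :: t := by
  match r with
  | [] => exact ⟨[], by simp [myRep]⟩
  | e :: r' =>
    by_cases h : d = '_' ∧ e = '_'
    · obtain ⟨h1, h2⟩ := h
      subst h1; subst h2
      exact ⟨myRep r', by simp [myRep]⟩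
    · exact ⟨myRep (e :: r'), by simp [myRep, h]⟩

-- collapse is invariant under one replace pass (joint with the dropWhile version)
lemma collapse_myRep (n : Nat) : ∀ s : List Char, s.length ≤ n →
    collapse (myRep s) = collapse s ∧
      collapse ((myRep s).dropWhile us) = collapse (s.dropWhile us) := by
  induction n with
  | zero =>
    intro s h
    have : s = [] := List.eq_nil_of_length_eq_zero (Nat.le_zero.mp h)
    subst this
    simp [myRep]
  | succ n ih =>
    intro s h
    match s with
    | [] => simp [myRep]
    | [c] => simp [myRep]
    | c :: d :: r =>
      by_cases hcd : c = '_' ∧ d = '_'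
      · obtain ⟨h1, h2⟩ := hcd
        subst h1; subst h2
        have hr := ih r (by simp at h ⊢; omega)
        rw [show myRep ('_' :: '_' :: r) = '_' :: myRep r from by simp [myRep]]
        constructor
        · rw [collapse, collapse, if_pos rfl, if_pos rfl]
          rw [show List.dropWhile us ('_' :: r) = List.dropWhile us r by simp [us]]
          rw [hr.2]
        · rw [show List.dropWhile us ('_' :: myRep r) = List.dropWhile us (myRep r) by simp [us]]
          rw [show List.dropWhile us ('_' :: '_' :: r) = List.dropWhile us r by simp [us]]
          exact hr.2
      · have hr := ih (d :: r) (by simp at h ⊢; omega)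
        obtain ⟨t, ht⟩ := myRep_head d r
        simp only [myRep, if_neg hcd]
        by_cases hc : c = '_'
        · subst hc
          have hd : ¬ d = '_' := fun hd => hcd ⟨rfl, hd⟩
          have hdw : List.dropWhile us (myRep (d :: r)) = myRep (d :: r) := by
            rw [ht]; simp [us, hd]
          constructor
          · rw [collapse, collapse, if_pos rfl, if_pos rfl, hr.2]
          · rw [show List.dropWhile us ('_' :: myRep (d :: r)) = List.dropWhile us (myRep (d :: r)) by
              simp [us]]
            rw [show List.dropWhile us ('_' :: d :: r) = d :: r by
              simp [us, hd]]
            rw [hdw, hr.1]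
        · have hdw1 : List.dropWhile us (c :: myRep (d :: r)) = c :: myRep (d :: r) := by
            simp [us, hc]
          have hdw2 : List.dropWhile us (c :: d :: r) = c :: d :: r := by
            simp [us, hc]
          have hmain : collapse (c :: myRep (d :: r)) = collapse (c :: d :: r) := by
            rw [collapse, collapse, if_neg hc, if_neg hc, hr.1]
          exact ⟨hmain, by rw [hdw1, hdw2]; exact hmain⟩

-- a string without "__" is its own collapse
lemma collapse_of_no_double (s : List Char) (h : ¬ (['_', '_'] : List Char) <:+: s) :
    collapse s = s := by
  induction s using collapse.induct with
  | case1 => simp [collapse]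
  | case2 r ih =>
    have hrd : List.dropWhile us r = r := by
      match r with
      | [] => rfl
      | e :: r' =>
        have he : ¬ e = '_' := by
          intro he; subst he
          exact h ⟨[], r', rfl⟩
        simp [us, he]
    have hr : ¬ (['_', '_'] : List Char) <:+: List.dropWhile us r := by
      rw [hrd]
      exact fun hi => h (hi.trans (List.suffix_cons '_' r).isInfix)
    rw [collapse, if_pos rfl, ih hr, hrd]
  | case3 c r hc ih =>
    have hr : ¬ (['_', '_'] : List Char) <:+: r := fun hi => h (hi.trans (List.suffix_cons c r).isInfix)
    rw [collapse, if_neg hc, ih hr]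

-- the while loop computes collapse
lemma pyAwhile_eq_collapse (n : Nat) : ∀ s : List Char, s.length ≤ n →
    pyAwhile n s = collapse s := by
  induction n with
  | zero =>
    intro s h
    have : s = [] := List.eq_nil_of_length_eq_zero (Nat.le_zero.mp h)
    subst this
    simp [pyAwhile, collapse]
  | succ n ih =>
    intro s h
    by_cases hin : PySem.Chars.isIn ['_', '_'] s = true
    · have hinf := (PySem.Chars.isIn_iff_infix _ _).mp hin
      rw [pyAwhile, if_pos hin, replace_eq_myRep]
      rw [ih (myRep s) (by have := length_myRep_lt s hinf; omega)]
      exact (collapse_myRep s.length s le_rfl).1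
    · rw [pyAwhile, if_neg hin]
      exact (collapse_of_no_double s
        ((PySem.Chars.isIn_eq_false_iff _ _).mp (Bool.not_eq_true _ ▸ by simpa using hin))).symm

lemma rdropWhile_cons_neg (p : Char → Bool) (c : Char) (r : List Char) (hc : ¬ p c = true) :
    List.rdropWhile p (c :: r) = c :: List.rdropWhile p r := by
  induction r using List.reverseRecOn with
  | nil => simp [List.rdropWhile, hc]
  | append_singleton s a ih =>
    by_cases ha : p a = true
    · rw [show c :: (s ++ [a]) = (c :: s) ++ [a] by simp,
        List.rdropWhile_concat_pos p _ a ha, List.rdropWhile_concat_pos p _ a ha, ih]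
    · rw [show c :: (s ++ [a]) = (c :: s) ++ [a] by simp,
        List.rdropWhile_concat_neg p _ a ha, List.rdropWhile_concat_neg p _ a ha]
      simp

lemma rdropWhile_cons_pos (p : Char → Bool) (c : Char) (r : List Char) (hc : p c = true) :
    List.rdropWhile p (c :: r) =
      if List.rdropWhile p r = [] then [] else c :: List.rdropWhile p r := by
  induction r using List.reverseRecOn with
  | nil => simp [List.rdropWhile, hc]
  | append_singleton s a ih =>
    by_cases ha : p a = true
    · rw [show c :: (s ++ [a]) = (c :: s) ++ [a] by simp,
        List.rdropWhile_concat_pos p _ a ha, List.rdropWhile_concat_pos p _ a ha, ih]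
    · rw [show c :: (s ++ [a]) = (c :: s) ++ [a] by simp,
        List.rdropWhile_concat_neg p _ a ha, List.rdropWhile_concat_neg p _ a ha]
      simp

-- tfun ignores a trailing '_'
lemma tfun_concat_us (p : Bool) : ∀ s : List Char, tfun p (s ++ ['_']) = tfun p s := by
  intro s
  induction s generalizing p with
  | nil => simp [tfun]
  | cons c r ih =>
    by_cases hc : c = '_'
    · subst hc
      rw [List.cons_append, tfun, tfun, if_pos rfl, if_pos rfl, ih]
    · rw [List.cons_append, tfun, tfun, if_neg hc, if_neg hc, ih]

-- tfun ignores all trailing underscores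
lemma tfun_rdropWhile (p : Bool) (s : List Char) :
    tfun p (List.rdropWhile us s) = tfun p s := by
  induction s using List.reverseRecOn generalizing p with
  | nil => simp
  | append_singleton r a ih =>
    by_cases ha : us a = true
    · have ha' : a = '_' := by simpa [us] using ha
      subst ha'
      rw [List.rdropWhile_concat_pos us _ _ ha, tfun_concat_us, ih]
    · rw [List.rdropWhile_concat_neg us _ _ ha]

-- on a string with no trailing underscores, collapse is B's tail function
lemma collapse_eq_tfun (n : Nat) : ∀ s : List Char, s.length ≤ n →
    List.rdropWhile us s = s →
    collapse s = tfun false s ∧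
      (s ≠ [] → '_' :: collapse (s.dropWhile us) = tfun true s) := by
  induction n with
  | zero =>
    intro s hl h
    have : s = [] := List.eq_nil_of_length_eq_zero (Nat.le_zero.mp hl)
    subst this
    exact ⟨by simp [collapse, tfun], fun hne => absurd rfl hne⟩
  | succ n ih =>
    intro s hl h
    match s with
    | [] => exact ⟨by simp [collapse, tfun], fun hne => absurd rfl hne⟩
    | c :: r =>
      by_cases hc : c = '_'
      · subst hc
        rw [rdropWhile_cons_pos us '_' r (by simp [us])] at h
        by_cases he : List.rdropWhile us r = []
        · rw [if_pos he] at h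
          exact absurd h.symm (List.cons_ne_nil _ _)
        · rw [if_neg he] at h
          have hr : List.rdropWhile us r = r := (List.cons_inj_right _).mp h
          have hne : r ≠ [] := by
            intro h0; subst h0; exact he (List.rdropWhile_nil us)
          have ihr := (ih r (by simp at hl; omega) hr).2 hne
          refine ⟨?_, ?_⟩
          · rw [collapse, if_pos rfl, tfun, if_pos rfl, ihr]
          · intro _
            rw [show List.dropWhile us ('_' :: r) = List.dropWhile us r by simp [us],
              tfun, if_pos rfl, ihr]
      · rw [rdropWhile_cons_neg us c r (by simp [us, hc])] at h
        have hr : List.rdropWhile us r = r := (List.cons_inj_right _).mp h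
        have ihr := (ih r (by simp at hl; omega) hr).1
        refine ⟨?_, ?_⟩
        · rw [collapse, if_neg hc, tfun, if_neg hc, ihr]
          simp
        · intro _
          rw [show List.dropWhile us (c :: r) = c :: r by simp [us, hc],
            tfun, if_neg hc, collapse, if_neg hc, ihr]
          simp

-- startf skips leading underscores
lemma startf_dropWhile (s : List Char) : startf (s.dropWhile us) = startf s := by
  induction s with
  | nil => rfl
  | cons c r ih =>
    by_cases hc : c = '_'
    · subst hc
      rw [show List.dropWhile us ('_' :: r) = List.dropWhile us r by simp [us],
        startf, if_pos rfl, ih]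
    · rw [show List.dropWhile us (c :: r) = c :: r by simp [us, hc]]

-- the bridge: B's one-pass result = collapse of the stripped string
lemma us_head_dropWhile (m : List Char) (c : Char) (r : List Char)
    (h : m.dropWhile us = c :: r) : us c = false := by
  induction m with
  | nil => simp at h
  | cons a t ih =>
    by_cases ha : us a = true
    · rw [List.dropWhile_cons, if_pos ha] at h
      exact ih h
    · rw [List.dropWhile_cons, if_neg ha] at h
      injection h with h1 h2
      subst h1
      simpa using ha

lemma startf_eq_collapse_strip (m : List Char) :
    startf m = collapse (List.rdropWhile us (m.dropWhile us)) := by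
  rw [← startf_dropWhile]
  cases hm : m.dropWhile us with
  | nil => simp [startf, collapse]
  | cons c r =>
    have hc : us c = false := us_head_dropWhile m c r hm
    have hc' : ¬ c = '_' := by simpa [us] using hc
    rw [rdropWhile_cons_neg us c r (by simp [hc]), startf, if_neg hc',
      collapse, if_neg hc']
    have := (collapse_eq_tfun (List.rdropWhile us r).length (List.rdropWhile us r) le_rfl
      (List.rdropWhile_idempotent us r)).1
    rw [this, tfun_rdropWhile]

-- A's chars loop builds the singleton strings [mapc c]
lemma chars_loop_eq (cs : List Char) : ∀ acc : List (List Char),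
    cs.foldl
      (fun acc ch =>
        if ('A' ≤ ch ∧ ch ≤ 'Z') ∨ ('0' ≤ ch ∧ ch ≤ '9') then acc ++ [[ch]]
        else acc ++ [['_']]) acc = acc ++ cs.map (fun c => [mapc c]) := by
  induction cs with
  | nil => simp
  | cons c r ih =>
    intro acc
    rw [List.foldl_cons, ih, List.map_cons]
    by_cases hcnd : ('A' ≤ c ∧ c ≤ 'Z') ∨ ('0' ≤ c ∧ c ≤ '9')
    · rw [if_pos hcnd, show mapc c = c from if_pos hcnd]
      simp
    · rw [if_neg hcnd, show mapc c = '_' from if_neg hcnd]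
      simp

-- B's fold, nonempty accumulator
lemma fold_tail (cs : List Char) : ∀ (acc : List Char) (p : Bool), acc ≠ [] →
    (cs.foldl
      (fun (st : List Char × Bool) ch =>
        if ('A' ≤ ch ∧ ch ≤ 'Z') ∨ ('0' ≤ ch ∧ ch ≤ '9') then
          ((if st.2 && !st.1.isEmpty then st.1 ++ ['_'] else st.1) ++ [ch], false)
        else (st.1, true)) (acc, p)).1 = acc ++ tfun p (cs.map mapc) := by
  induction cs with
  | nil => intro acc p _; simp [tfun]
  | cons c r ih =>
    intro acc p hacc
    by_cases hcnd : ('A' ≤ c ∧ c ≤ 'Z') ∨ ('0' ≤ c ∧ c ≤ '9')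
    · have hm : mapc c = c := if_pos hcnd
      have hc' : ¬ c = '_' := by
        intro h0; rw [h0] at hcnd
        revert hcnd; decide
      have hE : acc.isEmpty = false := by
        cases acc with
        | nil => exact absurd rfl hacc
        | cons x t => rfl
      rw [List.foldl_cons]
      simp only [if_pos hcnd, hE, Bool.not_false, Bool.and_true]
      rw [ih _ _ (by simp), List.map_cons, hm, tfun, if_neg hc']
      cases p <;> simp
    · have hm : mapc c = '_' := if_neg hcnd
      rw [List.foldl_cons]
      simp only [if_neg hcnd]
      rw [ih _ _ hacc, List.map_cons, hm, tfun, if_pos rfl]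

-- B's fold from the start
lemma fold_start (cs : List Char) : ∀ p : Bool,
    (cs.foldl
      (fun (st : List Char × Bool) ch =>
        if ('A' ≤ ch ∧ ch ≤ 'Z') ∨ ('0' ≤ ch ∧ ch ≤ '9') then
          ((if st.2 && !st.1.isEmpty then st.1 ++ ['_'] else st.1) ++ [ch], false)
        else (st.1, true)) ([], p)).1 = startf (cs.map mapc) := by
  induction cs with
  | nil => intro p; simp [startf]
  | cons c r ih =>
    intro p
    by_cases hcnd : ('A' ≤ c ∧ c ≤ 'Z') ∨ ('0' ≤ c ∧ c ≤ '9')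
    · have hm : mapc c = c := if_pos hcnd
      have hc' : ¬ c = '_' := by
        intro h0; rw [h0] at hcnd
        revert hcnd; decide
      rw [List.foldl_cons]
      simp only [if_pos hcnd, List.isEmpty_nil, Bool.not_true, Bool.and_false,
        Bool.false_eq_true, if_false, List.nil_append]
      rw [fold_tail r [c] false (by simp), List.map_cons, hm, startf, if_neg hc']
      simp
    · have hm : mapc c = '_' := if_neg hcnd
      rw [List.foldl_cons]
      simp only [if_neg hcnd]
      rw [ih true, List.map_cons, hm, startf, if_pos rfl]

lemma strip_eq (m : List Char) :
    PySem.Chars.stripChars m ['_'] = List.rdropWhile us (List.dropWhile us m) := by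
  have h : (fun c => (['_'] : List Char).contains c) = us := by
    funext c; simp [us]
  simp only [PySem.Chars.stripChars, List.rdropWhile, h]

-- ===== VERDICT (by name: the statement is the Claim_ definition above) =====
theorem normalize_profile_label_py_spec : Claim_equal_normalize_profile_label_py := by
  intro label _
  unfold Spec_normalize_profile_label_py
  unfold normalize_profile_label_py normalize_profile_label_py_alt
  rw [fold_start]
  rw [chars_loop_eq]
  have hjoin : PySem.Chars.join []
      (List.map (fun c => [mapc c]) (PySem.Str.upper label).toList)
      = (PySem.Str.upper label).toList.map mapc := by
    rw [show (List.map (fun c => [mapc c]) (PySem.Str.upper label).toList)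
        = List.map (fun c => [c]) ((PySem.Str.upper label).toList.map mapc) by
      simp [List.map_map]]
    exact PySem.Chars.join_nil_singletons _
  simp only [List.nil_append, hjoin, strip_eq]
  rw [pyAwhile_eq_collapse _ _ le_rfl, startf_eq_collapse_strip]
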